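-- pv_equiv track=rewrite | github.com/Listera0/TransCompiler_for_beginner | [3] Realize/TransCompiler for beginner/CPP.py | FindNextWord
-- ===== SOURCE A (Python) =====
-- WordEndList = [" ", "=", ";", "(", ")", "{", "}", "[", "]", ">", "<", "\n", "\r"]
--
-- def FindNextWord( code ):
--     word = None
--     startindex = 0
--     startword = False
--
--     for i in range(0, len(code)):
--         if startword == False and code[i] not in WordEndList:
--             startindex = i
--             startword = True
--
--         if startword and code[i] in WordEndList:
--             word = code[startindex : i]
--             return word
--
--     return word
-- ===== SOURCE B (Python) =====
-- WordEndList = [" ", "=", ";", "(", ")", "{", "}", "[", "]", ">", "<", "\n", "\r"]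
--
-- def FindNextWord(code):
--     # Phase 1: skip leading delimiters.
--     idx = 0
--     n = len(code)
--     while idx < n and code[idx] in WordEndList:
--         idx += 1
--     if idx == n:
--         return None
--     # Phase 2: collect word characters until a delimiter terminates the word.
--     word = []
--     while idx < n:
--         ch = code[idx]
--         if ch in WordEndList:
--             return "".join(word)
--         word.append(ch)
--         idx += 1
--     return None
-- ===== Notes on version B (the rewrite author's own statement) =====
-- stated objective: simpler
-- what changed: Replaced the single flag-driven loop (startword/startindex state plus a slice at the end) by two plain sequential phases: skip leading delimiters, then collect word characters until a terminating delimiter.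
import Mathlib
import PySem

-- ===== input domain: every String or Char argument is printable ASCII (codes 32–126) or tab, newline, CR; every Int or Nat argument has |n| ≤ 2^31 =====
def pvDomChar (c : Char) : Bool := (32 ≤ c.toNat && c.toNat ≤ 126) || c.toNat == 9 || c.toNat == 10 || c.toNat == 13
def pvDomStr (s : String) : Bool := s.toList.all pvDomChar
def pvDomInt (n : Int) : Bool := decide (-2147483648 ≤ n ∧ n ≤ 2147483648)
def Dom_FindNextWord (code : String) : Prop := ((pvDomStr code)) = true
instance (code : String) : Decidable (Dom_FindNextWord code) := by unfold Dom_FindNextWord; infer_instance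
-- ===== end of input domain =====

-- B replaces A's single flag-driven loop by two sequential phases (skip delimiters, then
-- collect the word); objective: simpler. Proved: identical return value on every input.

-- ===== PORT A =====
def wordEndList : List Char :=
  [' ', '=', ';', '(', ')', '{', '}', '[', ']', '>', '<', '\n', '\r']

-- the for-loop of A: state (startindex, startword), index i, remaining suffix of the code;
-- code[startindex:i] with 0 ≤ startindex ≤ i ≤ len is exactly (full.drop si).take (i - si)
def loopA (full : List Char) : List Char → Nat → Nat → Bool → Option String
  | [], _, _, _ => none        -- loop ends, word is still None
  | c :: rest, i, si, sw =>
    let p : Nat × Bool :=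
      if sw = false ∧ ¬ (c ∈ wordEndList) then (i, true) else (si, sw)
    if p.2 = true ∧ c ∈ wordEndList then
      some (String.mk ((full.drop p.1).take (i - p.1)))
    else
      loopA full rest (i + 1) p.1 p.2

def FindNextWord (code : String) : Option String :=
  loopA code.toList code.toList 0 0 false

-- ===== PORT B =====
-- phase 1 of Source B: advance past leading delimiters
def skipDelims : List Char → List Char
  | [] => []
  | c :: r => if c ∈ wordEndList then skipDelims r else c :: r

-- phase 2 of Source B: collect word characters; a delimiter terminates, end of input gives None
def grabWord (acc : List Char) : List Char → Option String
  | [] => none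
  | c :: r => if c ∈ wordEndList then some (String.mk acc) else grabWord (acc ++ [c]) r

def FindNextWord_alt (code : String) : Option String :=
  grabWord [] (skipDelims code.toList)

-- ===== PRECONDITION & SPEC =====
def Spec_FindNextWord (code : String) (out : Option String) : Prop := out = FindNextWord_alt code
instance (code : String) (out : Option String) : Decidable (Spec_FindNextWord code out) := by unfold Spec_FindNextWord; infer_instance

-- ===== CLAIM (what is proved, stated in full; the proofs are below) =====
def Claim_equal_FindNextWord : Prop := ∀ (code : String), Dom_FindNextWord code → Spec_FindNextWord code (FindNextWord code)

-- ===== LEMMAS AND PROOFS =====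

-- once A's loop is in the started state (startword = true, word started at s, current index i),
-- it behaves like B's grabWord with accumulator = the characters already consumed since s
theorem loopA_true (full : List Char) :
    ∀ (r acc : List Char) (i s : Nat), s ≤ i → full.drop s = acc ++ r →
      acc.length = i - s → loopA full r i s true = grabWord acc r := by
  intro r
  induction r with
  | nil => intro acc i s _ _ _; simp [loopA, grabWord]
  | cons c r' ih =>
    intro acc i s hsi hdrop hlen
    by_cases hc : c ∈ wordEndList
    · have hacc : (full.drop s).take (i - s) = acc := by
        rw [hdrop, ← hlen, List.take_left]
      simp [loopA, grabWord, hc, hacc]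
    · have := ih (acc ++ [c]) (i + 1) s (by omega)
        (by simpa using hdrop) (by simp [hlen]; omega)
      simp [loopA, grabWord, hc]
      exact this

-- in the not-yet-started state A's loop skips delimiters exactly like B's phase 1
theorem loopA_false (full : List Char) :
    ∀ (r : List Char) (i si : Nat), full.drop i = r →
      loopA full r i si false = grabWord [] (skipDelims r) := by
  intro r
  induction r with
  | nil => intro i si _; simp [loopA, skipDelims, grabWord]
  | cons c r' ih =>
    intro i si hdrop
    have hdrop' : full.drop (i + 1) = r' := by
      have : full.drop (i + 1) = (full.drop i).drop 1 := by
        rw [List.drop_drop]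
      simp [this, hdrop]
    by_cases hc : c ∈ wordEndList
    · simp [loopA, skipDelims, hc]
      exact ih (i + 1) si hdrop'
    · have h2 : loopA full r' (i + 1) i true = grabWord [c] r' :=
        loopA_true full r' [c] (i + 1) i (by omega)
          (by simpa using hdrop) (by simp)
      simp [loopA, skipDelims, grabWord, hc]
      exact h2

-- ===== VERDICT (by name: the statement is the Claim_ definition above) =====
theorem FindNextWord_spec : Claim_equal_FindNextWord := by
  intro code _
  unfold Spec_FindNextWord FindNextWord FindNextWord_alt
  exact loopA_false code.toList code.toList 0 0 (by simp)
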